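-- pv_equiv track=rewrite | github.com/6112/project-euler | problems/043.py | pandigitals_helper
-- ===== SOURCE A (Python) =====
-- def pandigitals_helper (pair, divisors, available):
--     """Used as a helper for generate_valid_pandigitals(), do not use directly.
--
--     Selects the next possible digit that validates the next division and
--     'yields' it recursively.
--
--     Args:
--         pair: 2-element list containing the previous two digits.
--         divisors: list containing the divisors that should be satisfied for
--         the rest of the digits, in order.
--         available: set containing the available digits for generating a number
--         that is still pandigital."""
--     # the current divisor to use
--     divisor = divisors[0]
--     # for each possible digit combination
--     for last_digit in available:
--         # if that combination is a multiple of the divisor, recurse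
--         if (pair[0] * 100 + pair[1] * 10 + last_digit) % divisor == 0:
--             # if this is the last digit
--             if len(divisors) == 1:
--                 # yield a list of the last digit only
--                 yield [last_digit]
--             else:
--                 # for each possible combination for the rest of the digits
--                 for pandigital in pandigitals_helper(
--                         [pair[1], last_digit], # last 2 digits
--                         divisors[1:], # divisions to use, in order
--                         available - {last_digit} # digits still available
--                         ):
--                     # yield the last digit followed by the rest
--                     yield [last_digit] + pandigital
-- ===== SOURCE B (Python) =====
-- def pandigitals_helper(pair, divisors, available):
--     """Iterative re-implementation: explicit DFS stack instead of recursion.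
--
--     Stack entries are (pair, remaining divisors, available digits, prefix);
--     children are pushed in reverse so they pop in the original order."""
--     stack = [(pair, divisors, available, [])]
--     while stack:
--         p, divs, avail, prefix = stack.pop()
--         divisor = divs[0]
--         if len(divs) == 1:
--             for d in avail:
--                 if (p[0] * 100 + p[1] * 10 + d) % divisor == 0:
--                     yield prefix + [d]
--         else:
--             pending = [d for d in avail
--                        if (p[0] * 100 + p[1] * 10 + d) % divisor == 0]
--             for d in reversed(pending):
--                 stack.append(([p[1], d], divs[1:], avail - {d}, prefix + [d]))
-- ===== Notes on version B (the rewrite author's own statement) =====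
-- stated objective: alternative
-- what changed: Replaces the recursive generator with an iterative depth-first search over an explicit stack of (pair, divisors, available, prefix) entries, pushing children in reverse so results come out in the original pre-order.
-- outside the precondition, e.g. on pandigitals_helper([1, 1], [2, 0], {3, 5}): A returns [], B returns []
import Mathlib
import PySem

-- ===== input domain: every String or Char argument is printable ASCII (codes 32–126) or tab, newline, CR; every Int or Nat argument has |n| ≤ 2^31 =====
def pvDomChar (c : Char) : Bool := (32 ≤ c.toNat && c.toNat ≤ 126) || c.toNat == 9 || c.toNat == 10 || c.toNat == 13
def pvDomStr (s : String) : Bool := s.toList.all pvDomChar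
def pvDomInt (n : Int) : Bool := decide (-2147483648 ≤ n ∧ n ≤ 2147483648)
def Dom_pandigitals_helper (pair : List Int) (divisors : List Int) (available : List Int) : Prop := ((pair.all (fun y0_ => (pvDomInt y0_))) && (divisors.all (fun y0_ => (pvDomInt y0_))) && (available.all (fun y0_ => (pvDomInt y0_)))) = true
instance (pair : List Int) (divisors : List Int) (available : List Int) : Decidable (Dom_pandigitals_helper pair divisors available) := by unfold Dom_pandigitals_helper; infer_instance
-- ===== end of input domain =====

-- B replaces A's recursive generator by an iterative DFS with an explicit stack (same results, same order); objective: alternative.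


-- ===== PORT A =====
-- A is a recursive generator; its port returns the list of yielded values, iterating
-- the 'available' set in its PySem.Set (insertion) order.
mutual
def pandigitals_helper (pair : List Int) (divisors : List Int) (available : List Int) : List (List Int) :=
  match divisors with
  | [] => []          -- Python: divisors[0] raises IndexError here; excluded by Pre_
  | divisor :: rest => pandigitalsA_loop pair divisor rest available available []
termination_by (divisors.length, available.length + 2)
decreasing_by
  · exact Prod.Lex.right _ (by omega)

def pandigitalsA_loop (pair : List Int) (divisor : Int) (rest : List Int)
    (available : List Int) (iter : List Int) (acc : List (List Int)) : List (List Int) :=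
  match iter with
  | [] => acc
  | d :: ds =>
    let p0 := PySem.List.pyGetD pair 0 0   -- pair[0]; in range under Pre_ whenever the loop runs
    let p1 := PySem.List.pyGetD pair 1 0   -- pair[1]
    let acc' :=
      if PySem.Int.mod (p0 * 100 + p1 * 10 + d) divisor == 0 then
        if rest = [] then acc ++ [[d]]
        else acc ++ (pandigitals_helper [p1, d] rest (PySem.Set.diff available [d])).map (fun t => d :: t)
      else acc
    pandigitalsA_loop pair divisor rest available ds acc'
termination_by (rest.length + 1, iter.length + 1)
decreasing_by
  · exact Prod.Lex.left _ _ (by omega)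
  · exact Prod.Lex.right _ (by simp only [List.length_cons]; omega)
end

-- ===== PORT B =====
-- weight of a stack entry, used only for the termination of the stack loop
def pandigitalsB_weight (e : List Int × List Int × List Int × List Int) : Nat :=
  (e.2.2.1.length + 1) ^ e.2.1.length

-- 'for d in reversed(pending): stack.append(f d)' pushes one by one onto the head
theorem pushRev_eq_map_append {α β : Type} (g : α → β) :
    ∀ (l : List α) (s : List β), l.foldl (fun st d => g d :: st) s = l.reverse.map g ++ s := by
  intro l
  induction l with
  | nil => intro s; simp
  | cons x xs ih => intro s; simp [List.foldl_cons, ih, List.map_append]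

theorem diff_singleton_length_lt {d : Int} {l : List Int} (h : d ∈ l) :
    (PySem.Set.diff l [d]).length < l.length := by
  simp only [PySem.Set.diff]
  apply List.length_filter_lt_length_iff_exists.mpr
  exact ⟨d, h, by simp [PySem.Set.contains]⟩

def pandigitals_alt_go (stack : List (List Int × List Int × List Int × List Int))
    (out : List (List Int)) : List (List Int) :=
  match stack with
  | [] => out
  | (p, divs, avail, pre) :: stack' =>
    match divs with
    | [] => out       -- Python: divs[0] raises IndexError; unreachable from Pre_ inputs
    | divisor :: rest =>
      let p0 := PySem.List.pyGetD p 0 0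
      let p1 := PySem.List.pyGetD p 1 0
      if rest = [] then
        let out' := avail.foldl (fun o d =>
          if PySem.Int.mod (p0 * 100 + p1 * 10 + d) divisor == 0 then o ++ [pre ++ [d]] else o) out
        pandigitals_alt_go stack' out'
      else
        let pending := avail.filter (fun d => PySem.Int.mod (p0 * 100 + p1 * 10 + d) divisor == 0)
        let stack'' := pending.reverse.foldl
          (fun st d => ([p1, d], rest, PySem.Set.diff avail [d], pre ++ [d]) :: st) stack'
        pandigitals_alt_go stack'' out
termination_by (stack.map pandigitalsB_weight).sum
decreasing_by
  · simp only [List.map_cons, List.sum_cons]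
    have h0 : 0 < pandigitalsB_weight (p, divisor :: rest, avail, pre) := by
      simp only [pandigitalsB_weight]; positivity
    omega
  · simp only [pushRev_eq_map_append, List.unattach_filter, List.unattach_attach,
      List.reverse_reverse, List.map_cons, List.sum_cons, List.map_append, List.sum_append,
      List.map_map]
    have hb : ∀ e ∈ (List.filter (fun d => PySem.Int.mod (PySem.List.pyGetD p 0 0 * 100 + PySem.List.pyGetD p 1 0 * 10 + d) divisor == 0) avail).map
        (pandigitalsB_weight ∘ fun d => ([PySem.List.pyGetD p 1 0, d], rest, PySem.Set.diff avail [d], pre ++ [d])),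
        e ≤ avail.length ^ rest.length := by
      intro e he
      simp only [List.mem_map, Function.comp] at he
      obtain ⟨d, hd, rfl⟩ := he
      have hdm : d ∈ avail := List.mem_of_mem_filter hd
      have hlt := diff_singleton_length_lt hdm
      simp only [pandigitalsB_weight]
      exact Nat.pow_le_pow_left (by omega) _
    have hsum := List.sum_le_card_nsmul _ _ hb
    simp only [smul_eq_mul] at hsum
    have hlen : ((List.filter (fun d => PySem.Int.mod (PySem.List.pyGetD p 0 0 * 100 + PySem.List.pyGetD p 1 0 * 10 + d) divisor == 0) avail).map
        (pandigitalsB_weight ∘ fun d => ([PySem.List.pyGetD p 1 0, d], rest, PySem.Set.diff avail [d], pre ++ [d]))).length ≤ avail.length := by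
      simpa using List.length_filter_le _ avail
    have hpow : avail.length * avail.length ^ rest.length < pandigitalsB_weight (p, divisor :: rest, avail, pre) := by
      simp only [pandigitalsB_weight, List.length_cons]
      calc avail.length * avail.length ^ rest.length = avail.length ^ (rest.length + 1) := by ring
        _ < (avail.length + 1) ^ (rest.length + 1) := Nat.pow_lt_pow_left (by omega) (by omega)
    have hmul := Nat.mul_le_mul_right (avail.length ^ rest.length) hlen
    omega

def pandigitals_helper_alt (pair : List Int) (divisors : List Int) (available : List Int) : List (List Int) :=
  pandigitals_alt_go [(pair, divisors, available, [])] []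

-- ===== PRECONDITION & SPEC =====
-- Pre_ excludes exactly the inputs where Python A raises — empty divisors, or a pair shorter
-- than 2 with nonempty available (IndexError) — and, conservatively, any input with a 0 among
-- the first len(available) divisors (possible ZeroDivisionError); on some of those the zero
-- divisor is never reached and A returns normally (see claim.json cites).
def Pre_pandigitals_helper (pair : List Int) (divisors : List Int) (available : List Int) : Prop :=
  divisors ≠ [] ∧ (available = [] ∨ (2 ≤ pair.length ∧ (0 : Int) ∉ divisors.take available.length))
instance (pair : List Int) (divisors : List Int) (available : List Int) : Decidable (Pre_pandigitals_helper pair divisors available) := by unfold Pre_pandigitals_helper; infer_instance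

def pvWitness_pandigitals_helper : List Int × List Int × List Int := ([8, 1], [2, 3], [0, 6, 9])

def Spec_pandigitals_helper (pair : List Int) (divisors : List Int) (available : List Int) (out : List (List Int)) : Prop := out = pandigitals_helper_alt pair divisors available
instance (pair : List Int) (divisors : List Int) (available : List Int) (out : List (List Int)) : Decidable (Spec_pandigitals_helper pair divisors available out) := by unfold Spec_pandigitals_helper; infer_instance

-- ===== CLAIM (what is proved, stated in full; the proofs are below) =====
def Claim_equal_pandigitals_helper : Prop := ∀ (pair : List Int) (divisors : List Int) (available : List Int), Dom_pandigitals_helper pair divisors available → Pre_pandigitals_helper pair divisors available → Spec_pandigitals_helper pair divisors available (pandigitals_helper pair divisors available)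

-- ===== LEMMAS AND PROOFS =====

-- eta-bridge for the attach-form foldl produced by well-founded-recursion preprocessing
theorem foldl_attach_eta {α β : Type} (l : List α) (f : β → α → β) (b : β) :
    List.foldl (fun acc t => f acc t.1) b l.attach = List.foldl f b l := by
  conv_rhs => rw [← List.foldl_attach]

-- A's loop, characterised: filter + flatMap over the iterated suffix
theorem pandigitalsA_loop_eq (pair : List Int) (divisor : Int) (rest available : List Int) :
    ∀ (iter : List Int) (acc : List (List Int)),
    pandigitalsA_loop pair divisor rest available iter acc
      = acc ++ (iter.filter (fun d =>
          PySem.Int.mod (PySem.List.pyGetD pair 0 0 * 100 + PySem.List.pyGetD pair 1 0 * 10 + d) divisor == 0)).flatMap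
          (fun d => if rest = [] then [[d]]
            else (pandigitals_helper [PySem.List.pyGetD pair 1 0, d] rest (PySem.Set.diff available [d])).map
              (fun t => d :: t)) := by
  intro iter
  induction iter with
  | nil => intro acc; simp [pandigitalsA_loop]
  | cons d ds ih =>
    intro acc
    rw [pandigitalsA_loop, ih]
    by_cases h : PySem.Int.mod (PySem.List.pyGetD pair 0 0 * 100 + PySem.List.pyGetD pair 1 0 * 10 + d) divisor = 0
    · by_cases hr : rest = [] <;> simp [h, hr]
    · simp [h]

-- B's stack machine, characterised: every entry contributes A's results under its prefix
theorem pandigitals_alt_go_eq :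
    ∀ (stack : List (List Int × List Int × List Int × List Int)) (out : List (List Int)),
    (∀ e ∈ stack, e.2.1 ≠ []) →
    pandigitals_alt_go stack out
      = out ++ stack.flatMap (fun e => (pandigitals_helper e.1 e.2.1 e.2.2.1).map (fun t => e.2.2.2 ++ t)) := by
  intro stack out
  fun_induction pandigitals_alt_go stack out with
  | case1 out => intro _; simp
  | case2 out p avail pre stack' =>
    intro h
    exact absurd rfl (h (p, [], avail, pre) (by simp))
  | case3 out p avail pre stack' divisor p0 p1 out' ih =>
    intro h
    have hrec := ih (fun e he => h e (List.mem_cons_of_mem _ he))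
    have hout : out' = avail.foldl (fun o d =>
        if PySem.Int.mod (PySem.List.pyGetD p 0 0 * 100 + PySem.List.pyGetD p 1 0 * 10 + d) divisor == 0
        then o ++ [pre ++ [d]] else o) out := by
      simp only [out', dite_eq_ite, p0, p1]
      exact foldl_attach_eta avail (fun o d =>
        if (PySem.Int.mod (PySem.List.pyGetD p 0 0 * 100 + PySem.List.pyGetD p 1 0 * 10 + d) divisor == 0) = true
        then o ++ [pre ++ [d]] else o) out
    rw [hout] at hrec
    show pandigitals_alt_go stack' (avail.foldl (fun o d =>
        if PySem.Int.mod (PySem.List.pyGetD p 0 0 * 100 + PySem.List.pyGetD p 1 0 * 10 + d) divisor == 0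
        then o ++ [pre ++ [d]] else o) out) = _
    rw [hrec]
    simp only [List.flatMap_cons]
    rw [pandigitals_helper, pandigitalsA_loop_eq]
    simp only [PySem.List.foldl_append_if]
    simp [← List.map_eq_flatMap, List.map_map, Function.comp_def, List.append_assoc]
  | case4 out p avail pre stack' divisor rest p0 p1 hr pending stack'' ih =>
    intro h
    have hpend : pending = avail.filter (fun d =>
        PySem.Int.mod (PySem.List.pyGetD p 0 0 * 100 + PySem.List.pyGetD p 1 0 * 10 + d) divisor == 0) := by
      simp only [pending, List.unattach_filter, List.unattach_attach, p0, p1]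
    have hst : stack'' = pending.map
        (fun d => ([PySem.List.pyGetD p 1 0, d], rest, PySem.Set.diff avail [d], pre ++ [d])) ++ stack' := by
      simp only [stack'', pushRev_eq_map_append, List.reverse_reverse, p1]
    have hrec := ih (by
      intro e he
      rw [hst] at he
      rcases List.mem_append.mp he with hm | hm
      · obtain ⟨d, _, rfl⟩ := List.mem_map.mp hm
        exact hr
      · exact h e (List.mem_cons_of_mem _ hm))
    rw [hst, hpend] at hrec
    show pandigitals_alt_go ((avail.filter (fun d =>
        PySem.Int.mod (PySem.List.pyGetD p 0 0 * 100 + PySem.List.pyGetD p 1 0 * 10 + d) divisor == 0)).reverse.foldl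
        (fun st d => ([PySem.List.pyGetD p 1 0, d], rest, PySem.Set.diff avail [d], pre ++ [d]) :: st) stack') out = _
    rw [pushRev_eq_map_append, List.reverse_reverse, hrec]
    simp only [List.flatMap_append, List.flatMap_cons, List.flatMap_map]
    rw [pandigitals_helper, pandigitalsA_loop_eq]
    simp only [if_neg hr]
    simp [List.map_map, Function.comp_def, List.append_assoc, List.map_flatMap]

-- ===== VERDICT (by name: the statement is the Claim_ definition above) =====
theorem pandigitals_helper_spec : Claim_equal_pandigitals_helper := by
  intro pair divisors available _ hpre
  unfold Spec_pandigitals_helper pandigitals_helper_alt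
  rw [pandigitals_alt_go_eq _ _ (by intro e he; simp at he; subst he; exact hpre.1)]
  simp
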